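-- pv_equiv track=rewrite | github.com/pympk/py3810 | yf_utils.py | top_set_sym_freq_cnt
-- ===== SOURCE A (Python) =====
-- def top_set_sym_freq_cnt(top_set_syms_n_freq):
--     """
--     Top_set_syms_n_freq is a list of tuples. Each tuple is a pair of symbol:frequency_count, i.e.:
--       [('LNTH', 6), ('TNK', 6), ('FTSM', 5), ('EME', 4), ('FCN', 4), ('PRG', 3), ('SGEN', 3)]
--
--     The function can accommodate upto 5 periods of days_lookbacks, i.e.:
--       days_lookbacks = [5, 10, 15, 20, 25], len(days_lookbacks)*3 = 15)
--
--     Returns a list of 14 lists. list[0], list[1], ..., list[14] are lists of symbols with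
--     frequency_count of 15, 14, ..., 2 respectively.
--
--     Args:
--       top_set_syms_n_freq(list): List of tuples. Each tuple is a pair of symbol:frequency_count, i.e.:
--         [('LNTH', 6), ('TNK', 6), ('FTSM', 5), ('EME', 4), ('FCN', 4), ('PRG', 3), ('SGEN', 3)]
--
--     Return:
--       l_sym_freq_cnt(list): list of 14 lists. list[0], list[1], ..., list[14] are lists of symbols with
--           frequency_count of 15, 14, ..., 2 respectively.
--     """
--
--     sym_freq_cnt_15 = []
--     sym_freq_cnt_14 = []
--     sym_freq_cnt_13 = []
--     sym_freq_cnt_12 = []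
--     sym_freq_cnt_11 = []
--     sym_freq_cnt_10 = []
--     sym_freq_cnt_9 = []
--     sym_freq_cnt_8 = []
--     sym_freq_cnt_7 = []
--     sym_freq_cnt_6 = []
--     sym_freq_cnt_5 = []
--     sym_freq_cnt_4 = []
--     sym_freq_cnt_3 = []
--     sym_freq_cnt_2 = []
--
--     for sym_n_freq in top_set_syms_n_freq:
--         _sym, _freq = sym_n_freq[0], sym_n_freq[1]
--         if _freq == 15:
--             sym_freq_cnt_15.append(_sym)
--         elif _freq == 14:
--             sym_freq_cnt_14.append(_sym)
--         elif _freq == 13: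
--             sym_freq_cnt_13.append(_sym)
--         elif _freq == 12:
--             sym_freq_cnt_12.append(_sym)
--         elif _freq == 11:
--             sym_freq_cnt_11.append(_sym)
--         elif _freq == 10:
--             sym_freq_cnt_10.append(_sym)
--         elif _freq == 9:
--             sym_freq_cnt_9.append(_sym)
--         elif _freq == 8:
--             sym_freq_cnt_8.append(_sym)
--         elif _freq == 7:
--             sym_freq_cnt_7.append(_sym)
--         elif _freq == 6:
--             sym_freq_cnt_6.append(_sym)
--         elif _freq == 5:
--             sym_freq_cnt_5.append(_sym)
--         elif _freq == 4:
--             sym_freq_cnt_4.append(_sym)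
--         elif _freq == 3:
--             sym_freq_cnt_3.append(_sym)
--         else:
--             sym_freq_cnt_2.append(_sym)
--
--     l_sym_freq_cnt = []
--
--     l_sym_freq_cnt.append(sym_freq_cnt_15)
--     l_sym_freq_cnt.append(sym_freq_cnt_14)
--     l_sym_freq_cnt.append(sym_freq_cnt_13)
--     l_sym_freq_cnt.append(sym_freq_cnt_12)
--     l_sym_freq_cnt.append(sym_freq_cnt_11)
--     l_sym_freq_cnt.append(sym_freq_cnt_10)
--     l_sym_freq_cnt.append(sym_freq_cnt_9)
--     l_sym_freq_cnt.append(sym_freq_cnt_8)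
--     l_sym_freq_cnt.append(sym_freq_cnt_7)
--     l_sym_freq_cnt.append(sym_freq_cnt_6)
--     l_sym_freq_cnt.append(sym_freq_cnt_5)
--     l_sym_freq_cnt.append(sym_freq_cnt_4)
--     l_sym_freq_cnt.append(sym_freq_cnt_3)
--     l_sym_freq_cnt.append(sym_freq_cnt_2)
--
--     return l_sym_freq_cnt
-- ===== SOURCE B (Python) =====
-- def top_set_sym_freq_cnt(top_set_syms_n_freq):
--     """Fourteen filter passes: one bucket per frequency 15..3, then a catch-all bucket."""
--     buckets = [[s for s, f in top_set_syms_n_freq if f == v] for v in range(15, 2, -1)]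
--     buckets.append([s for s, f in top_set_syms_n_freq if not (3 <= f <= 15)])
--     return buckets
-- ===== Notes on version B (the rewrite author's own statement) =====
-- stated objective: simpler
-- what changed: Replaces the 14 named accumulator lists and the 14-way if/elif dispatch inside one loop by per-bucket list-comprehension filters (one filter per target frequency 15..3 plus a catch-all filter), 5 lines instead of ~70.
import Mathlib
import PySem

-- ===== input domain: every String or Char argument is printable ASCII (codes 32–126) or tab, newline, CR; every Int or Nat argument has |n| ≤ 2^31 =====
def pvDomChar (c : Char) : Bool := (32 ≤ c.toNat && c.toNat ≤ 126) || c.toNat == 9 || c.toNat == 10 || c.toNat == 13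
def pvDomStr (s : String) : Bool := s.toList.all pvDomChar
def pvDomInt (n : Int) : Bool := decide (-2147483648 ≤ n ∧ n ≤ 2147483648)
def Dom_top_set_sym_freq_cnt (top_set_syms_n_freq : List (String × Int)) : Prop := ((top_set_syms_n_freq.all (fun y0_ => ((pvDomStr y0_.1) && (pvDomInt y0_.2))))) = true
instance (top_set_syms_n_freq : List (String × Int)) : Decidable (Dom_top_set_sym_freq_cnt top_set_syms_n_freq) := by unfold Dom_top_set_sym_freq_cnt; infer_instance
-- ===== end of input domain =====

-- B replaces A's single loop with 14 named accumulators and an if/elif ladder by one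
-- list-comprehension filter per bucket (simpler; not faster).

-- ===== PORT A =====
-- A's loop: 14 named accumulator lists, one pass, if/elif dispatch on _freq.
def pvALoop : List (String × Int) → List String → List String → List String → List String →
    List String → List String → List String → List String → List String → List String →
    List String → List String → List String → List String → List (List String)
  | [], a15, a14, a13, a12, a11, a10, a9, a8, a7, a6, a5, a4, a3, a2 =>
      [a15, a14, a13, a12, a11, a10, a9, a8, a7, a6, a5, a4, a3, a2]
  | (s, f) :: rest, a15, a14, a13, a12, a11, a10, a9, a8, a7, a6, a5, a4, a3, a2 =>
      if f == 15 then pvALoop rest (a15 ++ [s]) a14 a13 a12 a11 a10 a9 a8 a7 a6 a5 a4 a3 a2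
      else if f == 14 then pvALoop rest a15 (a14 ++ [s]) a13 a12 a11 a10 a9 a8 a7 a6 a5 a4 a3 a2
      else if f == 13 then pvALoop rest a15 a14 (a13 ++ [s]) a12 a11 a10 a9 a8 a7 a6 a5 a4 a3 a2
      else if f == 12 then pvALoop rest a15 a14 a13 (a12 ++ [s]) a11 a10 a9 a8 a7 a6 a5 a4 a3 a2
      else if f == 11 then pvALoop rest a15 a14 a13 a12 (a11 ++ [s]) a10 a9 a8 a7 a6 a5 a4 a3 a2
      else if f == 10 then pvALoop rest a15 a14 a13 a12 a11 (a10 ++ [s]) a9 a8 a7 a6 a5 a4 a3 a2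
      else if f == 9 then pvALoop rest a15 a14 a13 a12 a11 a10 (a9 ++ [s]) a8 a7 a6 a5 a4 a3 a2
      else if f == 8 then pvALoop rest a15 a14 a13 a12 a11 a10 a9 (a8 ++ [s]) a7 a6 a5 a4 a3 a2
      else if f == 7 then pvALoop rest a15 a14 a13 a12 a11 a10 a9 a8 (a7 ++ [s]) a6 a5 a4 a3 a2
      else if f == 6 then pvALoop rest a15 a14 a13 a12 a11 a10 a9 a8 a7 (a6 ++ [s]) a5 a4 a3 a2
      else if f == 5 then pvALoop rest a15 a14 a13 a12 a11 a10 a9 a8 a7 a6 (a5 ++ [s]) a4 a3 a2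
      else if f == 4 then pvALoop rest a15 a14 a13 a12 a11 a10 a9 a8 a7 a6 a5 (a4 ++ [s]) a3 a2
      else if f == 3 then pvALoop rest a15 a14 a13 a12 a11 a10 a9 a8 a7 a6 a5 a4 (a3 ++ [s]) a2
      else pvALoop rest a15 a14 a13 a12 a11 a10 a9 a8 a7 a6 a5 a4 a3 (a2 ++ [s])

def top_set_sym_freq_cnt (top_set_syms_n_freq : List (String × Int)) : List (List String) :=
  pvALoop top_set_syms_n_freq [] [] [] [] [] [] [] [] [] [] [] [] [] []

-- ===== PORT B =====
-- one filter pass per bucket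
def pvBkt (xs : List (String × Int)) (v : Int) : List String :=
  (xs.filter (fun p => p.2 == v)).map Prod.fst

def pvRest (xs : List (String × Int)) : List String :=
  (xs.filter (fun p => !(decide (3 ≤ p.2) && decide (p.2 ≤ 15)))).map Prod.fst

def top_set_sym_freq_cnt_alt (top_set_syms_n_freq : List (String × Int)) : List (List String) :=
  ((PySem.List.pyRange 15 2 (-1)).map (fun v => pvBkt top_set_syms_n_freq v))
    ++ [pvRest top_set_syms_n_freq]

-- ===== PRECONDITION & SPEC =====
def Spec_top_set_sym_freq_cnt (top_set_syms_n_freq : List (String × Int)) (out : List (List String)) : Prop := out = top_set_sym_freq_cnt_alt top_set_syms_n_freq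
instance (top_set_syms_n_freq : List (String × Int)) (out : List (List String)) : Decidable (Spec_top_set_sym_freq_cnt top_set_syms_n_freq out) := by unfold Spec_top_set_sym_freq_cnt; infer_instance

-- ===== CLAIM (what is proved, stated in full; the proofs are below) =====
def Claim_equal_top_set_sym_freq_cnt : Prop := ∀ (top_set_syms_n_freq : List (String × Int)), Dom_top_set_sym_freq_cnt top_set_syms_n_freq → Spec_top_set_sym_freq_cnt top_set_syms_n_freq (top_set_sym_freq_cnt top_set_syms_n_freq)

-- ===== LEMMAS AND PROOFS =====

lemma pvALoop_spec (xs : List (String × Int)) :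
    ∀ a15 a14 a13 a12 a11 a10 a9 a8 a7 a6 a5 a4 a3 a2 : List String,
    pvALoop xs a15 a14 a13 a12 a11 a10 a9 a8 a7 a6 a5 a4 a3 a2 =
      [a15 ++ pvBkt xs 15, a14 ++ pvBkt xs 14, a13 ++ pvBkt xs 13, a12 ++ pvBkt xs 12,
       a11 ++ pvBkt xs 11, a10 ++ pvBkt xs 10, a9 ++ pvBkt xs 9, a8 ++ pvBkt xs 8,
       a7 ++ pvBkt xs 7, a6 ++ pvBkt xs 6, a5 ++ pvBkt xs 5, a4 ++ pvBkt xs 4,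
       a3 ++ pvBkt xs 3, a2 ++ pvRest xs] := by
  induction xs with
  | nil => intro a15 a14 a13 a12 a11 a10 a9 a8 a7 a6 a5 a4 a3 a2; simp [pvALoop, pvBkt, pvRest]
  | cons hd tl ih =>
    intro a15 a14 a13 a12 a11 a10 a9 a8 a7 a6 a5 a4 a3 a2
    obtain ⟨s, f⟩ := hd
    simp only [pvALoop]
    by_cases h15 : f == 15
    · rw [if_pos h15]
      have : f = 15 := by simpa using h15
      subst this
      simp [ih, pvBkt, pvRest, List.append_assoc]
    rw [if_neg h15]
    by_cases h14 : f == 14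
    · rw [if_pos h14]
      have : f = 14 := by simpa using h14
      subst this
      simp [ih, pvBkt, pvRest, List.append_assoc]
    rw [if_neg h14]
    by_cases h13 : f == 13
    · rw [if_pos h13]
      have : f = 13 := by simpa using h13
      subst this
      simp [ih, pvBkt, pvRest, List.append_assoc]
    rw [if_neg h13]
    by_cases h12 : f == 12
    · rw [if_pos h12]
      have : f = 12 := by simpa using h12
      subst this
      simp [ih, pvBkt, pvRest, List.append_assoc]
    rw [if_neg h12]
    by_cases h11 : f == 11
    · rw [if_pos h11]
      have : f = 11 := by simpa using h11
      subst this
      simp [ih, pvBkt, pvRest, List.append_assoc]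
    rw [if_neg h11]
    by_cases h10 : f == 10
    · rw [if_pos h10]
      have : f = 10 := by simpa using h10
      subst this
      simp [ih, pvBkt, pvRest, List.append_assoc]
    rw [if_neg h10]
    by_cases h9 : f == 9
    · rw [if_pos h9]
      have : f = 9 := by simpa using h9
      subst this
      simp [ih, pvBkt, pvRest, List.append_assoc]
    rw [if_neg h9]
    by_cases h8 : f == 8
    · rw [if_pos h8]
      have : f = 8 := by simpa using h8
      subst this
      simp [ih, pvBkt, pvRest, List.append_assoc]
    rw [if_neg h8]
    by_cases h7 : f == 7
    · rw [if_pos h7]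
      have : f = 7 := by simpa using h7
      subst this
      simp [ih, pvBkt, pvRest, List.append_assoc]
    rw [if_neg h7]
    by_cases h6 : f == 6
    · rw [if_pos h6]
      have : f = 6 := by simpa using h6
      subst this
      simp [ih, pvBkt, pvRest, List.append_assoc]
    rw [if_neg h6]
    by_cases h5 : f == 5
    · rw [if_pos h5]
      have : f = 5 := by simpa using h5
      subst this
      simp [ih, pvBkt, pvRest, List.append_assoc]
    rw [if_neg h5]
    by_cases h4 : f == 4
    · rw [if_pos h4]
      have : f = 4 := by simpa using h4
      subst this
      simp [ih, pvBkt, pvRest, List.append_assoc]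
    rw [if_neg h4]
    by_cases h3 : f == 3
    · rw [if_pos h3]
      have : f = 3 := by simpa using h3
      subst this
      simp [ih, pvBkt, pvRest, List.append_assoc]
    rw [if_neg h3]
    have hout : f < 3 ∨ 15 < f := by
      simp only [beq_iff_eq] at h15 h14 h13 h12 h11 h10 h9 h8 h7 h6 h5 h4 h3
      omega
    simp [ih, pvBkt, pvRest, List.append_assoc, h15, h14, h13, h12, h11, h10, h9, h8, h7, h6, h5, h4, h3, hout]

theorem top_set_sym_freq_cnt_spec' (xs : List (String × Int)) :
    top_set_sym_freq_cnt xs = top_set_sym_freq_cnt_alt xs := by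
  have hr : PySem.List.pyRange 15 2 (-1) =
      ([15, 14, 13, 12, 11, 10, 9, 8, 7, 6, 5, 4, 3] : List Int) := by decide
  simp [top_set_sym_freq_cnt, top_set_sym_freq_cnt_alt, pvALoop_spec, hr]

-- ===== VERDICT (by name: the statement is the Claim_ definition above) =====
theorem top_set_sym_freq_cnt_spec : Claim_equal_top_set_sym_freq_cnt := by
  intro xs _
  exact top_set_sym_freq_cnt_spec' xs
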